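-- pv_equiv track=rewrite | github.com/beyazitkolemen/serverbond-agent | api/main.py | _slugify_script_path
-- ===== SOURCE A (Python) =====
-- from typing import Any, Dict, List, Mapping, MutableMapping, Sequence
--
-- def _slugify_script_path(relative_path: str) -> str:
--     """Convert a script path to an HTTP endpoint slug.
--
--     Examples
--     --------
--     ``nginx/add_site.sh`` -> ``nginx/add-site``
--     ``install-php.sh`` -> ``install-php``
--     """
--
--     components = relative_path.split("/")
--     parts: List[str] = []
--     for index, part in enumerate(components):
--         if index == len(components) - 1:
--             part = part.rsplit(".", 1)[0]
--         part = part.replace("_", "-")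
--         parts.append(part)
--     return "/".join(parts)
-- ===== SOURCE B (Python) =====
-- def _slugify_script_path(relative_path: str) -> str:
--     """Convert a script path to an HTTP endpoint slug."""
--     head, sep, tail = relative_path.rpartition("/")
--     tail = tail.rsplit(".", 1)[0]
--     return head.replace("_", "-") + sep + tail.replace("_", "-")
-- ===== Notes on version B (the rewrite author's own statement) =====
-- stated objective: simpler
-- what changed: Replaced the split-into-components loop with its enumerate/index==len-1 bookkeeping and rejoin by a single rpartition('/') separating directory from filename, stripping the extension only from the filename and rejoining with the returned separator.
import Mathlib
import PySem

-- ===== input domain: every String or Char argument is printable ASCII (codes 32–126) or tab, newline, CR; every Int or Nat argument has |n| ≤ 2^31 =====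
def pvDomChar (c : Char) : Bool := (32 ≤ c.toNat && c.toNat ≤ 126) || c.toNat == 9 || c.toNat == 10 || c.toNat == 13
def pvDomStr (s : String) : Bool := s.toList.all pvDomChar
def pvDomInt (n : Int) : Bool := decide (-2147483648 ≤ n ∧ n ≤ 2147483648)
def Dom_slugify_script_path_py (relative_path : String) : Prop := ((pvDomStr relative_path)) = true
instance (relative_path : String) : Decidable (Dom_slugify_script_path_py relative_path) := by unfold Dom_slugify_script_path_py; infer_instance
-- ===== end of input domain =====

-- B replaces A's per-component enumerate loop and rejoin by one rpartition of directory from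
-- filename (objective: simpler). Return-value equivalence; neither version mutates anything.

-- hand port of Python's  s.rsplit(".", 1)[0]  (PySem has no rsplit): everything before the LAST
-- '.', or s itself if there is none — exact, used by both ports since both Pythons call it.
def pvRsplit1Dot : List Char → List Char
  | [] => []
  | c :: t =>
    if '.' ∈ t then c :: pvRsplit1Dot t
    else if c = '.' then [] else c :: pvRsplit1Dot t

-- ===== PORT A =====
def slugify_script_path_py (relative_path : String) : String :=
  let components := PySem.Chars.splitOn relative_path.toList ['/']
  let parts := (PySem.List.enumerate components).foldl
    (fun (parts : List (List Char)) ip =>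
      let part := if ip.1 = (components.length : Int) - 1 then pvRsplit1Dot ip.2 else ip.2
      let part := PySem.Chars.replace part ['_'] ['-']
      parts ++ [part]) []
  String.ofList (PySem.Chars.join ['/'] parts)

-- ===== PORT B =====
-- hand port of Python's  s.rpartition("/")  (PySem has no rpartition): exact — splits at the
-- LAST '/', returning ("", "", s) when there is none.
def pvRpartitionSlash : List Char → List Char × List Char × List Char
  | [] => ([], [], [])
  | c :: t =>
    let r := pvRpartitionSlash t
    if r.2.1 = [] then
      if c = '/' then ([], ['/'], t) else ([], [], c :: t)
    else (c :: r.1, r.2.1, r.2.2)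

def slugify_script_path_py_alt (relative_path : String) : String :=
  let p := pvRpartitionSlash relative_path.toList
  let tail := pvRsplit1Dot p.2.2
  String.ofList (PySem.Chars.replace p.1 ['_'] ['-'] ++ p.2.1 ++
    PySem.Chars.replace tail ['_'] ['-'])

-- ===== PRECONDITION & SPEC =====
def Spec_slugify_script_path_py (relative_path : String) (out : String) : Prop := out = slugify_script_path_py_alt relative_path
instance (relative_path : String) (out : String) : Decidable (Spec_slugify_script_path_py relative_path out) := by unfold Spec_slugify_script_path_py; infer_instance

-- ===== CLAIM (what is proved, stated in full; the proofs are below) =====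
def Claim_equal_slugify_script_path_py : Prop := ∀ (relative_path : String), Dom_slugify_script_path_py relative_path → Spec_slugify_script_path_py relative_path (slugify_script_path_py relative_path)

-- ===== LEMMAS AND PROOFS =====

def pvU (c : Char) : Char := if c = '_' then '-' else c

theorem pvRep_go (fuel : Nat) : ∀ (l acc : List Char), l.length ≤ fuel →
    PySem.Chars.replace.go ['_'] ['-'] fuel l acc = acc.reverse ++ l.map pvU := by
  induction fuel with
  | zero => intro l acc h; simp at h; subst h; simp [PySem.Chars.replace.go]
  | succ n ih =>
    intro l acc h
    cases l with
    | nil => simp [PySem.Chars.replace.go]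
    | cons c t =>
      simp only [PySem.Chars.replace.go]
      by_cases hc : c = '_'
      · subst hc
        rw [if_pos (by simp [List.isPrefixOf])]
        rw [ih _ _ (by simpa using Nat.lt_succ_iff.mp (by simpa using h))]
        simp [pvU]
      · have hpre : ¬(List.isPrefixOf ['_'] (c :: t)) = true := by
          simp [List.isPrefixOf]; exact fun hh => hc hh.symm
        rw [if_neg hpre]
        rw [ih _ _ (by simpa using Nat.lt_succ_iff.mp (by simpa using h))]
        simp [pvU, hc]

theorem pvRep_eq_map (l : List Char) :
    PySem.Chars.replace l ['_'] ['-'] = l.map pvU := by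
  simp [PySem.Chars.replace, pvRep_go l.length l [] le_rfl]

-- structural characterisation of split on '/'
def pvSplitChar : List Char → List (List Char)
  | [] => [[]]
  | c :: t => if c = '/' then [] :: pvSplitChar t else (pvSplitChar t).modifyHead (c :: ·)

theorem pvSplitChar_ne_nil (l : List Char) : pvSplitChar l ≠ [] := by
  induction l with
  | nil => simp [pvSplitChar]
  | cons c t ih =>
    simp only [pvSplitChar]
    split
    · simp
    · obtain ⟨x, xs, hx⟩ := List.exists_cons_of_ne_nil ih
      simp [hx, List.modifyHead]

theorem pvSplit_go (fuel : Nat) : ∀ (l cur : List Char) (acc : List (List Char)),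
    l.length ≤ fuel →
    PySem.Chars.splitOn.go ['/'] fuel l cur acc =
      acc.reverse ++ (pvSplitChar l).modifyHead (cur.reverse ++ ·) := by
  induction fuel with
  | zero =>
    intro l cur acc h; simp at h; subst h
    simp [PySem.Chars.splitOn.go, pvSplitChar, List.modifyHead]
  | succ n ih =>
    intro l cur acc h
    cases l with
    | nil => simp [PySem.Chars.splitOn.go, pvSplitChar, List.modifyHead]
    | cons c t =>
      simp only [PySem.Chars.splitOn.go]
      by_cases hc : c = '/'
      · subst hc
        rw [if_pos (by simp [List.isPrefixOf])]
        rw [ih _ _ _ (by simpa using Nat.lt_succ_iff.mp (by simpa using h))]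
        simp only [pvSplitChar, List.modifyHead, List.nil_append,
          List.reverse_cons, List.reverse_nil, List.append_assoc, List.cons_append]
        cases h' : pvSplitChar t <;> simp [h']
      · have hpre : ¬(List.isPrefixOf ['/'] (c :: t)) = true := by
          simp [List.isPrefixOf]; exact fun hh => hc hh.symm
        rw [if_neg hpre]
        rw [ih _ _ _ (by simpa using Nat.lt_succ_iff.mp (by simpa using h))]
        simp only [pvSplitChar, if_neg hc]
        obtain ⟨x, xs, hx⟩ := List.exists_cons_of_ne_nil (pvSplitChar_ne_nil t)
        simp [hx, List.modifyHead]

theorem pvSplitOn_eq (l : List Char) :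
    PySem.Chars.splitOn l ['/'] = pvSplitChar l := by
  have := pvSplit_go (l.length + 1) l [] [] (by omega)
  simp only [PySem.Chars.splitOn, this]
  obtain ⟨x, xs, hx⟩ := List.exists_cons_of_ne_nil (pvSplitChar_ne_nil l)
  simp [hx, List.modifyHead]

-- no-slash cases
theorem pvSplitChar_no_slash (l : List Char) (h : '/' ∉ l) : pvSplitChar l = [l] := by
  induction l with
  | nil => simp [pvSplitChar]
  | cons c t ih =>
    simp only [List.mem_cons, not_or] at h
    have hc : ¬ c = '/' := fun hh => h.1 hh.symm
    simp [pvSplitChar, hc, ih h.2, List.modifyHead]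

theorem pvRpart_no_slash (l : List Char) (h : '/' ∉ l) :
    pvRpartitionSlash l = ([], [], l) := by
  induction l with
  | nil => simp [pvRpartitionSlash]
  | cons c t ih =>
    simp only [List.mem_cons, not_or] at h
    have hc : ¬ c = '/' := fun hh => h.1 hh.symm
    simp [pvRpartitionSlash, ih h.2, hc]

-- last-slash decomposition
theorem pvLastSlash (l : List Char) (h : '/' ∈ l) :
    ∃ a b, l = a ++ '/' :: b ∧ '/' ∉ b := by
  induction l with
  | nil => simp at h
  | cons c t ih =>
    by_cases ht : '/' ∈ t
    · obtain ⟨a, b, hab, hb⟩ := ih ht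
      exact ⟨c :: a, b, by simp [hab], hb⟩
    · have hc : c = '/' := by
        rcases List.mem_cons.mp h with h1 | h2
        · exact h1.symm
        · exact absurd h2 ht
      exact ⟨[], t, by simp [hc], ht⟩

theorem pvSplitChar_append (a b : List Char) :
    pvSplitChar (a ++ '/' :: b) = pvSplitChar a ++ pvSplitChar b := by
  induction a with
  | nil => simp [pvSplitChar]
  | cons c t ih =>
    by_cases hc : c = '/'
    · simp [pvSplitChar, hc, ih]
    · simp only [List.cons_append, pvSplitChar, if_neg hc, ih]
      obtain ⟨x, xs, hx⟩ := List.exists_cons_of_ne_nil (pvSplitChar_ne_nil t)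
      simp [hx, List.modifyHead]

theorem pvRpart_append (a b : List Char) (hb : '/' ∉ b) :
    pvRpartitionSlash (a ++ '/' :: b) = (a, ['/'], b) := by
  induction a with
  | nil => simp [pvRpartitionSlash, pvRpart_no_slash b hb]
  | cons c t ih => simp [pvRpartitionSlash, ih]

-- join lemmas
theorem pvJoin_cons_cons (x y : List Char) (r : List (List Char)) :
    PySem.Chars.join ['/'] (x :: y :: r) = x ++ '/' :: PySem.Chars.join ['/'] (y :: r) := by
  simp [PySem.Chars.join, List.intercalate, List.intersperse]

theorem pvJoin_singleton (x : List Char) : PySem.Chars.join ['/'] [x] = x := by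
  simp [PySem.Chars.join, List.intercalate]

theorem pvJoin_splitChar (l : List Char) :
    PySem.Chars.join ['/'] (pvSplitChar l) = l := by
  induction l with
  | nil => simp only [pvSplitChar]; exact pvJoin_singleton []
  | cons c t ih =>
    by_cases hc : c = '/'
    · subst hc
      obtain ⟨x, xs, hx⟩ := List.exists_cons_of_ne_nil (pvSplitChar_ne_nil t)
      rw [pvSplitChar, if_pos rfl, hx, pvJoin_cons_cons [] x xs, ← hx, ih]
      simp
    · obtain ⟨x, xs, hx⟩ := List.exists_cons_of_ne_nil (pvSplitChar_ne_nil t)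
      rw [pvSplitChar]
      rw [if_neg hc, hx, List.modifyHead]
      cases xs with
      | nil => rw [pvJoin_singleton]; rw [hx, pvJoin_singleton] at ih; simp [ih]
      | cons y ys =>
        rw [pvJoin_cons_cons]
        rw [hx, pvJoin_cons_cons] at ih
        simp [← ih]

theorem pvJoin_concat (xs : List (List Char)) (y : List Char) (h : xs ≠ []) :
    PySem.Chars.join ['/'] (xs ++ [y]) = PySem.Chars.join ['/'] xs ++ '/' :: y := by
  induction xs with
  | nil => simp at h
  | cons x r ih =>
    cases r with
    | nil => simp [pvJoin_cons_cons]
    | cons z zs =>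
      simp only [List.cons_append]
      rw [pvJoin_cons_cons x z (zs ++ [y]), show z :: (zs ++ [y]) = (z :: zs) ++ [y] from rfl,
        ih (by simp), pvJoin_cons_cons]
      simp

theorem pvJoin_map (ps : List (List Char)) (h : ps ≠ []) :
    PySem.Chars.join ['/'] (ps.map (List.map pvU)) =
      (PySem.Chars.join ['/'] ps).map pvU := by
  induction ps with
  | nil => simp at h
  | cons x r ih =>
    cases r with
    | nil => simp
    | cons z zs =>
      have ih' := ih (by simp)
      simp only [List.map_cons] at ih' ⊢
      rw [pvJoin_cons_cons, pvJoin_cons_cons, ih']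
      simp [pvU]

-- A's loop over enumerate(components): the last component (index = len-1) gets the
-- extension stripped; every component gets '_'→'-'.
theorem pvFoldA (N : Int) : ∀ (qs : List (List Char)) (p : List Char) (s : Int)
    (acc : List (List Char)), s + qs.length = N →
    (PySem.List.enumerate (qs ++ [p]) s).foldl
      (fun (parts : List (List Char)) ip =>
        let part := if ip.1 = N then pvRsplit1Dot ip.2 else ip.2
        let part := PySem.Chars.replace part ['_'] ['-']
        parts ++ [part]) acc
      = acc ++ qs.map (List.map pvU) ++ [(pvRsplit1Dot p).map pvU] := by
  intro qs
  induction qs with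
  | nil =>
    intro p s acc hs
    simp only [List.length_nil, Nat.cast_zero, add_zero] at hs
    simp [PySem.List.enumerate_cons, PySem.List.enumerate_nil, hs, pvRep_eq_map]
  | cons q r ih =>
    intro p s acc hs
    have hsN : s ≠ N := by
      simp only [List.length_cons] at hs
      push_cast at hs
      omega
    rw [List.cons_append, PySem.List.enumerate_cons, List.foldl_cons]
    simp only [if_neg hsN]
    rw [ih p (s + 1) _ (by simp only [List.length_cons] at hs; push_cast at hs ⊢; omega)]
    simp [pvRep_eq_map]

theorem pvMain (l : List Char) :
    PySem.Chars.join ['/'] ((PySem.List.enumerate (PySem.Chars.splitOn l ['/'])).foldl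
      (fun (parts : List (List Char)) ip =>
        let part := if ip.1 = ((PySem.Chars.splitOn l ['/']).length : Int) - 1
          then pvRsplit1Dot ip.2 else ip.2
        let part := PySem.Chars.replace part ['_'] ['-']
        parts ++ [part]) [])
    = PySem.Chars.replace (pvRpartitionSlash l).1 ['_'] ['-'] ++ (pvRpartitionSlash l).2.1 ++
      PySem.Chars.replace (pvRsplit1Dot (pvRpartitionSlash l).2.2) ['_'] ['-'] := by
  rw [pvSplitOn_eq]
  by_cases h : '/' ∈ l
  · obtain ⟨a, b, hab, hb⟩ := pvLastSlash l h
    subst hab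
    rw [pvSplitChar_append, pvSplitChar_no_slash b hb, pvRpart_append a b hb]
    have hlen : ((pvSplitChar a ++ [b]).length : Int) - 1 = (0 : Int) + (pvSplitChar a).length := by
      simp
    rw [hlen, pvFoldA ((0 : Int) + (pvSplitChar a).length) (pvSplitChar a) b 0 [] rfl]
    simp only [List.nil_append]
    rw [pvJoin_concat _ _ (by simp [pvSplitChar_ne_nil]), pvJoin_map _ (pvSplitChar_ne_nil a),
      pvJoin_splitChar]
    simp [pvRep_eq_map]
  · rw [pvSplitChar_no_slash l h, pvRpart_no_slash l h]
    have : (([l] : List (List Char)).length : Int) - 1 = (0 : Int) + (([] : List (List Char)).length : Int) := by simp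
    rw [this]
    have hF := pvFoldA ((0 : Int) + (([] : List (List Char)).length : Int)) [] l 0 [] rfl
    simp only [List.nil_append] at hF
    rw [hF]
    simp [pvRep_eq_map]

-- ===== VERDICT (by name: the statement is the Claim_ definition above) =====
theorem slugify_script_path_py_spec : Claim_equal_slugify_script_path_py := by
  intro relative_path _
  unfold Spec_slugify_script_path_py slugify_script_path_py slugify_script_path_py_alt
  simp only []
  rw [pvMain relative_path.toList]
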